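-- pv_equiv track=rewrite | github.com/FacuGarces/IP-Ex-Algo1- | Python/Parcial B.py | stock_productos
-- ===== SOURCE A (Python) =====
-- def stock_productos(stock_cambios: list[str,int]) -> dict[str,(int,int)]:
--     res = {}
--
--     for i in range(len(stock_cambios)):
--         (nombre, cantidad) = stock_cambios[i]
--         if nombre not in res:
--             # Si el producto no está en el diccionario, se inicializa con la cantidad actual como mínimo y máximo
--             res[nombre] = (cantidad, cantidad)
--         else:
--             # Si el producto ya está en el diccionario, se actualizan los valores mínimo y máximo si es necesario
--             (min_stock, max_stock) = res[nombre]
--             if cantidad < min_stock: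
--                 min_stock = cantidad
--             if cantidad > max_stock:
--                 max_stock = cantidad
--             res[nombre] = (min_stock, max_stock)
--
--     return res
-- ===== SOURCE B (Python) =====
-- def stock_productos(stock_cambios: list[str, int]) -> dict[str, (int, int)]:
--     grupos = {}
--     for (nombre, cantidad) in stock_cambios:
--         grupos.setdefault(nombre, []).append(cantidad)
--     return {nombre: (min(vals), max(vals)) for nombre, vals in grupos.items()}
-- ===== Notes on version B (the rewrite author's own statement) =====
-- stated objective: simpler
-- what changed: A maintains a running (min,max) pair per product inside one loop with branch-heavy updates; B first groups all quantities per product (setdefault/append, first-appearance order) and then reduces each group with min/max in a separate comprehension pass.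
import Mathlib
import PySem

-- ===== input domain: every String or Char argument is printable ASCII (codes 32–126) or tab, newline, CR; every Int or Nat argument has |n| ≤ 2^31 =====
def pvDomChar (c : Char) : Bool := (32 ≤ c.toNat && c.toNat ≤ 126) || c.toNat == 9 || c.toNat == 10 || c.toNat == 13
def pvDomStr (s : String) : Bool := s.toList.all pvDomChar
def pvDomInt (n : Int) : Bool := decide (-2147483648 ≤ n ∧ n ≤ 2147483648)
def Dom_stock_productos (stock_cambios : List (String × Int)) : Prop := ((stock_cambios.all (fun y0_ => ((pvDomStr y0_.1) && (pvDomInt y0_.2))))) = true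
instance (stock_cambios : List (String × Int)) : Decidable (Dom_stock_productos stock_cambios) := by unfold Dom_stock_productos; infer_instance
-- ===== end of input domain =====

-- B replaces A's running min/max dict by grouping all quantities per product and reducing
-- each group with min/max in a second pass (objective: simpler decomposition, same cost).

-- ===== PORT A =====
-- loop body of A: one iteration of 'for i in range(len(stock_cambios))' applied to stock_cambios[i]
def pvAStep (res : PySem.Dict String (Int × Int)) (p : String × Int) : PySem.Dict String (Int × Int) :=
  if res.contains p.1 = false then
    res.insert p.1 (p.2, p.2)
  else
    -- res[nombre]: the key is present (guarded by 'nombre not in res'), so the getD default is unreachable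
    let mm := res.getD p.1 (0, 0)
    let min_stock := if p.2 < mm.1 then p.2 else mm.1
    let max_stock := if p.2 > mm.2 then p.2 else mm.2
    res.insert p.1 (min_stock, max_stock)

def stock_productos (stock_cambios : List (String × Int)) : List (String × Int × Int) :=
  ((PySem.List.pyRange 0 (PySem.List.len stock_cambios)).foldl
    (fun res j => pvAStep res (PySem.List.pyGetD stock_cambios j ("", 0)))
    PySem.Dict.empty).items

-- ===== PORT B =====
-- min(vals) / max(vals) of Source B; vals is a group list, nonempty by construction (0 unreachable)
def pvMinList : List Int → Int
  | [] => 0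
  | h :: t => t.foldl min h

def pvMaxList : List Int → Int
  | [] => 0
  | h :: t => t.foldl max h

def stock_productos_alt (stock_cambios : List (String × Int)) : List (String × Int × Int) :=
  let grupos := stock_cambios.foldl
    (fun (d : PySem.Dict String (List Int)) p => d.modify p.1 [] (fun x => x ++ [p.2]))
    PySem.Dict.empty
  grupos.items.map (fun p => (p.1, pvMinList p.2, pvMaxList p.2))

-- ===== PRECONDITION & SPEC =====
def Spec_stock_productos (stock_cambios : List (String × Int)) (out : List (String × Int × Int)) : Prop := out = stock_productos_alt stock_cambios
instance (stock_cambios : List (String × Int)) (out : List (String × Int × Int)) : Decidable (Spec_stock_productos stock_cambios out) := by unfold Spec_stock_productos; infer_instance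

-- ===== CLAIM (what is proved, stated in full; the proofs are below) =====
def Claim_equal_stock_productos : Prop := ∀ (stock_cambios : List (String × Int)), Dom_stock_productos stock_cambios → Spec_stock_productos stock_cambios (stock_productos stock_cambios)

-- ===== LEMMAS AND PROOFS =====

-- A's loop body is always an insert at key p.1
def pvAVal (res : PySem.Dict String (Int × Int)) (p : String × Int) : Int × Int :=
  if res.contains p.1 = false then (p.2, p.2)
  else
    let mm := res.getD p.1 (0, 0)
    (if p.2 < mm.1 then p.2 else mm.1, if p.2 > mm.2 then p.2 else mm.2)

lemma pvAStep_eq_insert (res : PySem.Dict String (Int × Int)) (p : String × Int) :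
    pvAStep res p = res.insert p.1 (pvAVal res p) := by
  unfold pvAStep pvAVal; split <;> rfl

lemma pvMinList_append (vs : List Int) (c : Int) (h : vs ≠ []) :
    pvMinList (vs ++ [c]) = min (pvMinList vs) c := by
  cases vs with
  | nil => exact absurd rfl h
  | cons a t => simp [pvMinList, List.foldl_append]

lemma pvMaxList_append (vs : List Int) (c : Int) (h : vs ≠ []) :
    pvMaxList (vs ++ [c]) = max (pvMaxList vs) c := by
  cases vs with
  | nil => exact absurd rfl h
  | cons a t => simp [pvMaxList, List.foldl_append]

lemma pv_contains_foldl (l : List (String × Int)) (k : String) :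
    (l.foldl pvAStep PySem.Dict.empty).contains k
      = !((l.filter (fun p => p.1 == k)).isEmpty) := by
  induction l using List.reverseRecOn with
  | nil => simp [PySem.Dict.contains_empty]
  | append_singleton l p ih =>
    rw [List.foldl_append]
    simp only [List.foldl_cons, List.foldl_nil, pvAStep_eq_insert,
      PySem.Dict.contains_insert, List.filter_append]
    by_cases hp : p.1 = k
    · simp [hp]
    · have : (p.1 == k) = false := by simp [hp]
      simp [ih, this, beq_iff_eq]
      intro h; exact absurd h.symm hp

lemma pv_getD_foldl (l : List (String × Int)) (k : String) :
    (l.foldl pvAStep PySem.Dict.empty).getD k (0, 0)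
      = (pvMinList ((l.filter (fun p => p.1 == k)).map (·.2)),
         pvMaxList ((l.filter (fun p => p.1 == k)).map (·.2))) := by
  induction l using List.reverseRecOn with
  | nil => simp [PySem.Dict.getD_empty, pvMinList, pvMaxList]
  | append_singleton l p ih =>
    rw [List.foldl_append]
    simp only [List.foldl_cons, List.foldl_nil, pvAStep_eq_insert, PySem.Dict.getD_insert,
      List.filter_append]
    by_cases hp : p.1 = k
    · subst hp
      rw [if_pos rfl]
      unfold pvAVal
      rw [pv_contains_foldl l p.1]
      have hfp : List.filter (fun q => q.1 == p.1) [p] = [p] := by simp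
      rw [hfp]
      by_cases hF : (l.filter (fun q => q.1 == p.1)) = []
      · simp [hF, pvMinList, pvMaxList]
      · have hne : ((l.filter (fun q => q.1 == p.1)).map (·.2)) ≠ [] := by simpa using hF
        have hc : (!(l.filter (fun q => q.1 == p.1)).isEmpty) = true := by
          simpa [List.isEmpty_iff] using hF
        rw [hc, if_neg (by simp)]
        simp only [ih, List.map_append, List.map_cons, List.map_nil]
        rw [pvMinList_append _ _ hne, pvMaxList_append _ _ hne]
        simp only [Prod.mk.injEq, min_def, max_def]
        constructor <;> (split_ifs <;> omega)
    · have hbk : (p.1 == k) = false := by simp [hp]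
      have hkb : ¬ (k = p.1) := fun h => hp h.symm
      simp [hbk, hkb, ih]

lemma pv_foldl_fun_eq :
    pvAStep = (fun (d : PySem.Dict String (Int × Int)) (x : String × Int) =>
      d.insert x.1 (pvAVal d x)) :=
  funext fun d => funext fun x => pvAStep_eq_insert d x

-- ===== VERDICT (by name: the statement is the Claim_ definition above) =====
theorem stock_productos_spec : Claim_equal_stock_productos := by
  intro l _
  show stock_productos l = stock_productos_alt l
  unfold stock_productos stock_productos_alt
  rw [PySem.List.foldl_pyRange_pyGetD l ("", 0) pvAStep PySem.Dict.empty (le_refl 0)]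
  simp only [Int.toNat_zero, List.drop_zero]
  -- key lists and nodup on both sides
  rw [pv_foldl_fun_eq]
  have hndA := PySem.Dict.nodup_keys_foldl_insert_key l (fun x : String × Int => x.1)
    pvAVal PySem.Dict.empty (by simp [PySem.Dict.keys_empty])
  have hndB := PySem.Dict.nodup_keys_foldl_modify_key l (fun x : String × Int => x.1)
    [] (fun d x v => v ++ [x.2]) PySem.Dict.empty (by simp [PySem.Dict.keys_empty])
  rw [PySem.Dict.items_eq_map_keys _ hndA (0, 0),
      PySem.Dict.items_eq_map_keys _ hndB [], List.map_map,
      PySem.Dict.keys_foldl_insert_key l (fun x : String × Int => x.1) pvAVal,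
      PySem.Dict.keys_foldl_modify_key l (fun x : String × Int => x.1) [] (fun d x v => v ++ [x.2])]
  apply List.map_congr_left
  intro k _
  rw [← pv_foldl_fun_eq, pv_getD_foldl l k]
  simp only [Function.comp_apply, PySem.Dict.getD_foldl_modify_append,
    PySem.Dict.getD_empty, List.nil_append]
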